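-- pv_equiv track=rewrite | github.com/trululu96/titulares | app.py | limits
-- ===== SOURCE A (Python) =====
-- def limits(noticias, max_y):
--     leaps = max_y//len(noticias)
--     completo = ''
--     limites = []
--     soft_limit = 0
--     for i in noticias:
--         if len(i) > leaps:
--             completo += i[0:leaps] + ' '
--         else:
--             completo += i + ' ' * (leaps - len(i))
--
--
--         limites.append([soft_limit, soft_limit + leaps])
--         soft_limit += leaps
--
--     return (limites, completo)
-- ===== SOURCE B (Python) =====
-- def limits(noticias, max_y):
--     leaps = max_y // len(noticias)
--
--     def slot(i):
--         return i[:leaps].ljust(leaps) + (' ' if len(i) > leaps else '')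
--
--     def go(lo, hi):
--         # divide and conquer over the index range [lo, hi)
--         if hi - lo == 1:
--             return [[lo * leaps, (lo + 1) * leaps]], slot(noticias[lo])
--         mid = (lo + hi) // 2
--         l1, s1 = go(lo, mid)
--         l2, s2 = go(mid, hi)
--         return l1 + l2, s1 + s2
--
--     return go(0, len(noticias))
-- ===== Notes on version B (the rewrite author's own statement) =====
-- stated objective: alternative
-- what changed: Replaces A's single left-to-right accumulating loop (running soft_limit, growing string) with a divide-and-conquer recursion over the index range: each leaf emits its slot from its index in closed form (lo*leaps boundaries, truncate-or-ljust text) and halves are concatenated.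
import Mathlib
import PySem

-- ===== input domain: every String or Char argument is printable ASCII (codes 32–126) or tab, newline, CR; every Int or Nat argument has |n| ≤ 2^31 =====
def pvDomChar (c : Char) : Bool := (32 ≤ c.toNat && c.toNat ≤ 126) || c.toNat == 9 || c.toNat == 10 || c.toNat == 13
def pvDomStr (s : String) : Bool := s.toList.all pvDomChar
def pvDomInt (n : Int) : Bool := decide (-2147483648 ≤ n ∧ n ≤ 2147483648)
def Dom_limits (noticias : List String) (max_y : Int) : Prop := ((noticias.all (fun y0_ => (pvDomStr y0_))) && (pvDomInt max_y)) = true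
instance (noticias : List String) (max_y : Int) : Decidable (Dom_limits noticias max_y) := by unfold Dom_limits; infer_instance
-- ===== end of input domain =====

-- B replaces A's single accumulating loop with a divide-and-conquer recursion over the
-- index range, each leaf computed in closed form (objective: alternative, same cost).

-- ===== PORT A =====
-- the for-loop of A, state (completo, limites, soft_limit)
def limitsLoop (leaps : Int) : List String → List Char → List (List Int) → Int → List (List Int) × List Char
  | [], completo, limites, _ => (limites, completo)
  | i :: rest, completo, limites, soft =>
    let completo' :=
      if (i.toList.length : Int) > leaps then
        completo ++ PySem.List.slice i.toList (some 0) (some leaps) ++ [' ']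
      else
        completo ++ i.toList ++ PySem.List.pyRepeat [' '] (leaps - (i.toList.length : Int))
    limitsLoop leaps rest completo' (limites ++ [[soft, soft + leaps]]) (soft + leaps)

def limits (noticias : List String) (max_y : Int) : List (List Int) × String :=
  let leaps := PySem.Int.floordiv max_y (noticias.length : Int)
  let r := limitsLoop leaps noticias [] [] 0
  (r.1, String.ofList r.2)

-- ===== PORT B =====
-- slot i = i[:leaps].ljust(leaps) + (' ' if len(i) > leaps else '')
def slotB (leaps : Int) (i : String) : List Char :=
  let t := PySem.List.slice i.toList none (some leaps)
  (t ++ PySem.List.pyRepeat [' '] (leaps - (t.length : Int))) ++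
    (if (i.toList.length : Int) > leaps then [' '] else [])

-- go(lo, hi): divide and conquer over the index range [lo, hi); the final 'else' branch
-- is a totality guard (Python's go is never called with hi ≤ lo)
def goB (leaps : Int) (noticias : List String) (lo hi : Nat) : List (List Int) × List Char :=
  if hi - lo = 1 then
    ([[(lo : Int) * leaps, ((lo : Int) + 1) * leaps]], slotB leaps (noticias.getD lo ""))
  else if lo < hi then
    let mid := (lo + hi) / 2
    let r1 := goB leaps noticias lo mid
    let r2 := goB leaps noticias mid hi
    (r1.1 ++ r2.1, r1.2 ++ r2.2)
  else ([], [])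
termination_by hi - lo
decreasing_by all_goals omega

def limits_alt (noticias : List String) (max_y : Int) : List (List Int) × String :=
  let leaps := PySem.Int.floordiv max_y (noticias.length : Int)
  let r := goB leaps noticias 0 noticias.length
  (r.1, String.ofList r.2)

-- ===== PRECONDITION & SPEC =====
-- Pre_ excludes only the empty list, on which Python A raises ZeroDivisionError (B raises too).
def Pre_limits (noticias : List String) (max_y : Int) : Prop := noticias ≠ []
instance (noticias : List String) (max_y : Int) : Decidable (Pre_limits noticias max_y) := by unfold Pre_limits; infer_instance
def pvWitness_limits : List String × Int := (["ab"], 5)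
def Spec_limits (noticias : List String) (max_y : Int) (out : List (List Int) × String) : Prop := out = limits_alt noticias max_y
instance (noticias : List String) (max_y : Int) (out : List (List Int) × String) : Decidable (Spec_limits noticias max_y out) := by unfold Spec_limits; infer_instance

-- ===== CLAIM =====
def Claim_equal_limits : Prop := ∀ (noticias : List String) (max_y : Int), Dom_limits noticias max_y → Pre_limits noticias max_y → Spec_limits noticias max_y (limits noticias max_y)

-- ===== LEMMAS AND PROOFS =====

-- A's per-title piece
def pvPiece (leaps : Int) (i : String) : List Char :=
  if (i.toList.length : Int) > leaps then
    PySem.List.slice i.toList (some 0) (some leaps) ++ [' ']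
  else
    i.toList ++ PySem.List.pyRepeat [' '] (leaps - (i.toList.length : Int))

theorem slotB_eq_pvPiece (leaps : Int) (i : String) : slotB leaps i = pvPiece leaps i := by
  unfold slotB pvPiece
  by_cases hgt : (i.toList.length : Int) > leaps
  · simp only [if_pos hgt, PySem.List.slice_zero_start]
    by_cases hpos : 0 ≤ leaps
    · obtain ⟨k, rfl⟩ := Int.eq_ofNat_of_zero_le hpos
      rw [PySem.List.slice_to_natCast]
      have hlen : (i.toList.take k).length = k := by
        rw [List.length_take]; omega
      rw [hlen]
      simp [PySem.List.pyRepeat_singleton]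
    · have h1 : leaps - ((PySem.List.slice i.toList none (some leaps)).length : Int) < 0 := by
        have := Int.natCast_nonneg (PySem.List.slice i.toList none (some leaps)).length
        omega
      rw [PySem.List.pyRepeat_singleton]
      have : (leaps - ((PySem.List.slice i.toList none (some leaps)).length : Int)).toNat = 0 := by omega
      simp [this]
  · simp only [if_neg hgt]
    have hpos : 0 ≤ leaps := le_trans (Int.natCast_nonneg _) (not_lt.mp hgt)
    obtain ⟨k, rfl⟩ := Int.eq_ofNat_of_zero_le hpos
    rw [PySem.List.slice_to_natCast]
    have htake : i.toList.take k = i.toList := List.take_of_length_le (by exact_mod_cast not_lt.mp hgt)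
    rw [htake]
    simp

theorem goB_eq (leaps : Int) (xs : List String) :
    ∀ (n lo hi : Nat), hi - lo = n → lo < hi → hi ≤ xs.length →
    goB leaps xs lo hi =
      ((List.range' lo (hi - lo)).map (fun (k : Nat) => [(k : Int) * leaps, ((k : Int) + 1) * leaps]),
       (((xs.drop lo).take (hi - lo)).map (slotB leaps)).flatten) := by
  intro n
  induction n using Nat.strong_induction_on with
  | _ n ih =>
    intro lo hi hn hlt hle
    rw [goB]
    by_cases h1 : hi - lo = 1
    · have hhi : hi = lo + 1 := by omega
      have hlo : lo < xs.length := by omega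
      have htk : (xs.drop lo).take 1 = [xs[lo]] := by
        rw [List.drop_eq_getElem_cons hlo, List.take_succ_cons, List.take_zero]
      simp only [h1]
      rw [if_pos trivial, htk]
      simp [List.range'_one, List.getD_eq_getElem?_getD, List.getElem?_eq_getElem hlo]
    · have hge : lo + 2 ≤ hi := by omega
      have hm1 : lo < (lo + hi) / 2 := by omega
      have hm2 : (lo + hi) / 2 < hi := by omega
      simp only [if_neg h1, if_pos hlt]
      rw [ih ((lo + hi) / 2 - lo) (by omega) lo ((lo + hi) / 2) rfl hm1 (by omega),
          ih (hi - (lo + hi) / 2) (by omega) ((lo + hi) / 2) hi rfl hm2 hle]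
      dsimp only
      rw [Prod.mk.injEq]
      refine ⟨?_, ?_⟩
      · rw [← List.map_append]
        congr 1
        have hsum : hi - lo = ((lo + hi) / 2 - lo) + (hi - (lo + hi) / 2) := by omega
        rw [hsum, ← List.range'_append]
        congr 1
        congr 1
        omega
      · rw [← List.flatten_append, ← List.map_append]
        congr 2
        have hdd : xs.drop ((lo + hi) / 2) = (xs.drop lo).drop ((lo + hi) / 2 - lo) := by
          rw [List.drop_drop]; congr 1; omega
        rw [hdd, ← List.take_add]
        congr 1
        omega

theorem limitsLoop_eq (leaps : Int) (xs : List String) :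
    ∀ (completo : List Char) (limites : List (List Int)) (soft : Int),
    limitsLoop leaps xs completo limites soft =
      (limites ++ (List.range xs.length).map
          (fun k : Nat => [soft + (k : Int) * leaps, soft + ((k : Int) + 1) * leaps]),
       completo ++ (xs.map (pvPiece leaps)).flatten) := by
  induction xs with
  | nil => intro c l s; simp [limitsLoop]
  | cons i rest ih =>
    intro c l s
    simp only [limitsLoop, ih, List.length_cons, List.range_succ_eq_map, List.map_cons,
      List.map_map, List.flatten_cons, Prod.mk.injEq]
    refine ⟨?_, ?_⟩
    · rw [List.append_assoc]
      congr 1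
      rw [List.cons_append]
      congr 1
      · simp only [List.cons.injEq, and_true]; exact ⟨by ring, by ring⟩
      · apply List.map_congr_left
        intro k _
        simp only [Function.comp_apply]
        simp only [List.cons.injEq, and_true]
        exact ⟨by push_cast; ring, by push_cast; ring⟩
    · unfold pvPiece
      split <;> simp

-- ===== VERDICT =====
theorem limits_spec : Claim_equal_limits := by
  intro noticias max_y _ hne
  unfold Spec_limits limits limits_alt
  have hlen : 0 < noticias.length := List.length_pos_iff.mpr hne
  simp only [limitsLoop_eq, goB_eq _ _ noticias.length 0 noticias.length (by omega) hlen le_rfl,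
    Nat.sub_zero, List.drop_zero, List.nil_append]
  rw [Prod.mk.injEq]
  constructor
  · rw [← List.range_eq_range']
    apply List.map_congr_left
    intro k _
    simp only [List.cons.injEq, and_true]
    exact ⟨by ring, by ring⟩
  · rw [List.take_of_length_le le_rfl]
    congr 1
    exact congrArg List.flatten (List.map_congr_left (fun i _ => (slotB_eq_pvPiece _ i).symm))
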